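-- pv_equiv track=rewrite | github.com/dweilert/sync-models | sync-models.py | compute_sync_plan
-- ===== SOURCE A (Python) =====
-- from typing import Dict, Any, List, Tuple, Optional
--
-- def mtime_close(a: int, b: int, tol_sec: int = 2) -> bool:
--     return abs(int(a) - int(b)) <= int(tol_sec)
--
-- def compute_sync_plan(
--     src_files: Dict[str, Dict[str, int]],
--     dst_files: Dict[str, Dict[str, int]],
--     mtime_strict: bool,
--     mtime_tolerance_sec: int
-- ) -> Tuple[List[str], Dict[str, int]]:
--     """
--     Return (to_copy_relpaths, stats)
--
--     Rules:
--       - missing on dst -> copy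
--       - size differs -> copy
--       - size matches:
--           - if mtime_strict is False -> skip
--           - if mtime_strict is True:
--               - if mtime differs beyond tolerance -> copy
--               - else -> skip
--     """
--     to_copy: List[str] = []
--     same_size_skipped = 0
--     same_size_mtime_skipped = 0
--     same_size_mtime_copy = 0
--     size_diff_copy = 0
--     missing_copy = 0
--
--     for rel, sm in src_files.items():
--         dm = dst_files.get(rel)
--         if not dm:
--             to_copy.append(rel)
--             missing_copy += 1
--             continue
--
--         if int(sm.get("size", 0)) != int(dm.get("size", 0)):
--             to_copy.append(rel)
--             size_diff_copy += 1
--             continue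
--
--         # sizes match:
--         if not mtime_strict:
--             same_size_skipped += 1
--             continue
--
--         if not mtime_close(int(sm.get("mtime", 0)), int(dm.get("mtime", 0)), tol_sec=mtime_tolerance_sec):
--             to_copy.append(rel)
--             same_size_mtime_copy += 1
--         else:
--             same_size_mtime_skipped += 1
--
--     stats = {
--         "missing_copy": missing_copy,
--         "size_diff_copy": size_diff_copy,
--         "same_size_skipped": same_size_skipped,
--         "same_size_mtime_copy": same_size_mtime_copy,
--         "same_size_mtime_skipped": same_size_mtime_skipped,
--         "total_source_files": len(src_files),
--         "total_dest_files": len(dst_files),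
--         "planned_copies": len(to_copy),
--     }
--     return to_copy, stats
-- ===== SOURCE B (Python) =====
-- from typing import Dict, Any, List, Tuple, Optional
--
-- def mtime_close(a: int, b: int, tol_sec: int = 2) -> bool:
--     return abs(int(a) - int(b)) <= int(tol_sec)
--
-- def compute_sync_plan(src_files, dst_files, mtime_strict, mtime_tolerance_sec):
--     # Staged partition pipeline: successive sieves split the source entries into the
--     # five category lists; to_copy is rebuilt in source order from a set of copy rels.
--     items = list(src_files.items())
--     missing = [(r, s) for r, s in items if not dst_files.get(r)]
--     present = [(r, s) for r, s in items if dst_files.get(r)]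
--     diff    = [(r, s) for r, s in present
--                if int(s.get("size", 0)) != int(dst_files[r].get("size", 0))]
--     same    = [(r, s) for r, s in present
--                if int(s.get("size", 0)) == int(dst_files[r].get("size", 0))]
--     if mtime_strict:
--         sskip = []
--         mcopy = [(r, s) for r, s in same
--                  if not mtime_close(int(s.get("mtime", 0)),
--                                     int(dst_files[r].get("mtime", 0)),
--                                     tol_sec=mtime_tolerance_sec)]
--         mskip = [(r, s) for r, s in same
--                  if mtime_close(int(s.get("mtime", 0)),
--                                 int(dst_files[r].get("mtime", 0)),
--                                 tol_sec=mtime_tolerance_sec)]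
--     else:
--         sskip, mcopy, mskip = same, [], []
--     copy_set = {r for r, _ in missing} | {r for r, _ in diff} | {r for r, _ in mcopy}
--     to_copy = [r for r, _ in items if r in copy_set]
--     stats = {
--         "missing_copy": len(missing),
--         "size_diff_copy": len(diff),
--         "same_size_skipped": len(sskip),
--         "same_size_mtime_copy": len(mcopy),
--         "same_size_mtime_skipped": len(mskip),
--         "total_source_files": len(src_files),
--         "total_dest_files": len(dst_files),
--         "planned_copies": len(to_copy),
--     }
--     return to_copy, stats
-- ===== Notes on version B (the rewrite author's own statement) =====
-- stated objective: alternative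
-- what changed: A classifies each file inside one stateful loop over six accumulators; B is a staged partition pipeline: successive filter passes split the source entries into the five category lists (whose lengths are the stats), a set of copy rel-paths is formed from three of them, and to_copy is rebuilt by one membership filter over the source order.
import Mathlib
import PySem

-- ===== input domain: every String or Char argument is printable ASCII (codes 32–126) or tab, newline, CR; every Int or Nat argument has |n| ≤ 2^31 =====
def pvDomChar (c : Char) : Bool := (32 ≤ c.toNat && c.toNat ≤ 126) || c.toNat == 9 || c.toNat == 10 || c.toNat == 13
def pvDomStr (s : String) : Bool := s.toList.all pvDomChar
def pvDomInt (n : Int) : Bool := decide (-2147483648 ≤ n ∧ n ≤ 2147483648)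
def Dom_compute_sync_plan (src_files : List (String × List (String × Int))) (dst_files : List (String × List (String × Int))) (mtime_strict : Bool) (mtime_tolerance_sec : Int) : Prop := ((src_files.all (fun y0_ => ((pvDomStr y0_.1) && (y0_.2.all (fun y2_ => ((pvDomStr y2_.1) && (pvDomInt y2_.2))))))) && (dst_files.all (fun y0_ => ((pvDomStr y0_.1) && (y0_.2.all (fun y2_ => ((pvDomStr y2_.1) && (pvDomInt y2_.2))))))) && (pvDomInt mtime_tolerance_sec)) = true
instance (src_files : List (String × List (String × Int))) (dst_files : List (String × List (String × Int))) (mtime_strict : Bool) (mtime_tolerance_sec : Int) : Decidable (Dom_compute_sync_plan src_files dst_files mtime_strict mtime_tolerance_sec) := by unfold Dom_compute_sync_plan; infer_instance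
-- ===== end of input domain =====

-- B replaces A's single stateful loop by a staged partition pipeline (successive filter
-- passes, stats = list lengths, to_copy rebuilt from a set of copy rels); objective: alternative.

-- ===== PORT A =====
def mtime_close (a : Int) (b : Int) (tol_sec : Int) : Bool := decide (|a - b| ≤ tol_sec)

-- state: (to_copy, same_size_skipped, same_size_mtime_skipped, same_size_mtime_copy, size_diff_copy, missing_copy)
def cspStepA (dst_files : List (String × List (String × Int))) (mtime_strict : Bool) (mtime_tolerance_sec : Int)
    (acc : List String × Int × Int × Int × Int × Int) (p : String × List (String × Int)) :
    List String × Int × Int × Int × Int × Int :=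
  let rel := p.1
  let sm := p.2
  let (to_copy, sss, ssms, ssmc, sdc, mc) := acc
  match (PySem.Dict.mk dst_files).get? rel with
  | none => (to_copy ++ [rel], sss, ssms, ssmc, sdc, mc + 1)          -- `not dm` : None is falsy
  | some dm =>
    if dm.isEmpty then (to_copy ++ [rel], sss, ssms, ssmc, sdc, mc + 1) -- `not dm` : {} is falsy too
    else if (PySem.Dict.mk sm).getD "size" 0 ≠ (PySem.Dict.mk dm).getD "size" 0 then
      (to_copy ++ [rel], sss, ssms, ssmc, sdc + 1, mc)
    else if !mtime_strict then (to_copy, sss + 1, ssms, ssmc, sdc, mc)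
    else if !(mtime_close ((PySem.Dict.mk sm).getD "mtime" 0) ((PySem.Dict.mk dm).getD "mtime" 0) mtime_tolerance_sec) then
      (to_copy ++ [rel], sss, ssms, ssmc + 1, sdc, mc)
    else (to_copy, sss, ssms + 1, ssmc, sdc, mc)

def compute_sync_plan (src_files : List (String × List (String × Int))) (dst_files : List (String × List (String × Int))) (mtime_strict : Bool) (mtime_tolerance_sec : Int) : List String × (List (String × Int)) :=
  let st := src_files.foldl (cspStepA dst_files mtime_strict mtime_tolerance_sec) ([], 0, 0, 0, 0, 0)
  let to_copy := st.1
  (to_copy,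
    [("missing_copy", st.2.2.2.2.2),
     ("size_diff_copy", st.2.2.2.2.1),
     ("same_size_skipped", st.2.1),
     ("same_size_mtime_copy", st.2.2.2.1),
     ("same_size_mtime_skipped", st.2.2.1),
     ("total_source_files", PySem.List.len src_files),
     ("total_dest_files", PySem.List.len dst_files),
     ("planned_copies", PySem.List.len to_copy)])

-- ===== PORT B =====
-- dst_files[r]; only evaluated on present keys, so the [] default is never used
def cspDm (dst_files : List (String × List (String × Int))) (r : String) : List (String × Int) :=
  ((PySem.Dict.mk dst_files).get? r).getD []

-- `not dst_files.get(r)` : None and {} are falsy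
def cspFalsy (dst_files : List (String × List (String × Int))) (p : String × List (String × Int)) : Bool :=
  match (PySem.Dict.mk dst_files).get? p.1 with
  | none => true
  | some l => l.isEmpty

def cspSizeNe (dst_files : List (String × List (String × Int))) (p : String × List (String × Int)) : Bool :=
  (PySem.Dict.mk p.2).getD "size" 0 != (PySem.Dict.mk (cspDm dst_files p.1)).getD "size" 0

def cspFar (dst_files : List (String × List (String × Int))) (tol : Int) (p : String × List (String × Int)) : Bool :=
  !(mtime_close ((PySem.Dict.mk p.2).getD "mtime" 0) ((PySem.Dict.mk (cspDm dst_files p.1)).getD "mtime" 0) tol)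

def compute_sync_plan_alt (src_files : List (String × List (String × Int))) (dst_files : List (String × List (String × Int))) (mtime_strict : Bool) (mtime_tolerance_sec : Int) : List String × (List (String × Int)) :=
  let items := src_files
  let missing := items.filter (fun p => cspFalsy dst_files p)
  let present := items.filter (fun p => !cspFalsy dst_files p)
  let diff := present.filter (fun p => cspSizeNe dst_files p)
  let same := present.filter (fun p => !cspSizeNe dst_files p)
  let smt : List (String × List (String × Int)) × List (String × List (String × Int)) × List (String × List (String × Int)) :=
    if mtime_strict then
      ([], same.filter (fun p => cspFar dst_files mtime_tolerance_sec p),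
           same.filter (fun p => !cspFar dst_files mtime_tolerance_sec p))
    else (same, [], [])
  let sskip := smt.1
  let mcopy := smt.2.1
  let mskip := smt.2.2
  let copy_set := PySem.Set.union (PySem.Set.union (PySem.Set.ofList (missing.map Prod.fst)) (diff.map Prod.fst)) (mcopy.map Prod.fst)
  let to_copy := (items.filter (fun p => PySem.Set.contains copy_set p.1)).map Prod.fst
  (to_copy,
    [("missing_copy", PySem.List.len missing),
     ("size_diff_copy", PySem.List.len diff),
     ("same_size_skipped", PySem.List.len sskip),
     ("same_size_mtime_copy", PySem.List.len mcopy),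
     ("same_size_mtime_skipped", PySem.List.len mskip),
     ("total_source_files", PySem.List.len src_files),
     ("total_dest_files", PySem.List.len dst_files),
     ("planned_copies", PySem.List.len to_copy)])

-- ===== PRECONDITION & SPEC =====
-- Pre_ excludes association lists with duplicate keys (outer rel-paths or inner "size"/"mtime"
-- maps): those do not encode any Python dict, so A's behaviour on them is undefined.
def pvNodupKeys {β : Type} : List (String × β) → Bool
  | [] => true
  | p :: r => !((r.map Prod.fst).contains p.1) && pvNodupKeys r

def Pre_compute_sync_plan (src_files : List (String × List (String × Int))) (dst_files : List (String × List (String × Int))) (mtime_strict : Bool) (mtime_tolerance_sec : Int) : Prop :=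
  (pvNodupKeys src_files && pvNodupKeys dst_files &&
   src_files.all (fun p => pvNodupKeys p.2) && dst_files.all (fun p => pvNodupKeys p.2)) = true
instance (src_files : List (String × List (String × Int))) (dst_files : List (String × List (String × Int))) (mtime_strict : Bool) (mtime_tolerance_sec : Int) : Decidable (Pre_compute_sync_plan src_files dst_files mtime_strict mtime_tolerance_sec) := by unfold Pre_compute_sync_plan; infer_instance

def pvWitness_compute_sync_plan : (List (String × List (String × Int))) × (List (String × List (String × Int))) × Bool × Int :=
  ([("a", [("size", 3), ("mtime", 10)]), ("b", [("size", 1)])],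
   [("a", [("size", 3), ("mtime", 12)])], true, 2)

def Spec_compute_sync_plan (src_files : List (String × List (String × Int))) (dst_files : List (String × List (String × Int))) (mtime_strict : Bool) (mtime_tolerance_sec : Int) (out : List String × (List (String × Int))) : Prop := out = compute_sync_plan_alt src_files dst_files mtime_strict mtime_tolerance_sec
instance (src_files : List (String × List (String × Int))) (dst_files : List (String × List (String × Int))) (mtime_strict : Bool) (mtime_tolerance_sec : Int) (out : List String × (List (String × Int))) : Decidable (Spec_compute_sync_plan src_files dst_files mtime_strict mtime_tolerance_sec out) := by unfold Spec_compute_sync_plan; infer_instance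

-- ===== CLAIM (what is proved, stated in full; the proofs are below) =====
def Claim_equal_compute_sync_plan : Prop := ∀ (src_files : List (String × List (String × Int))) (dst_files : List (String × List (String × Int))) (mtime_strict : Bool) (mtime_tolerance_sec : Int), Dom_compute_sync_plan src_files dst_files mtime_strict mtime_tolerance_sec → Pre_compute_sync_plan src_files dst_files mtime_strict mtime_tolerance_sec → Spec_compute_sync_plan src_files dst_files mtime_strict mtime_tolerance_sec (compute_sync_plan src_files dst_files mtime_strict mtime_tolerance_sec)

-- ===== LEMMAS AND PROOFS =====

-- proof-only classification of a source entry (mirrors A's decision tree)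
def cspClassify (dst : List (String × List (String × Int))) (strict : Bool) (tol : Int)
    (p : String × List (String × Int)) : String :=
  if cspFalsy dst p then "missing"
  else if cspSizeNe dst p then "size_diff"
  else if !strict then "skip_size"
  else if cspFar dst tol p then "mtime_copy"
  else "mtime_skip"

def cspCopyLab (L : String) : Bool := L == "missing" || L == "size_diff" || L == "mtime_copy"

lemma cspStepA_eq (dst : List (String × List (String × Int))) (strict : Bool) (tol : Int)
    (tc : List String) (a b c d e : Int) (p : String × List (String × Int)) :
    cspStepA dst strict tol (tc, a, b, c, d, e) p =
      (tc ++ (if cspCopyLab (cspClassify dst strict tol p) then [p.1] else []),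
       a + (if cspClassify dst strict tol p == "skip_size" then 1 else 0),
       b + (if cspClassify dst strict tol p == "mtime_skip" then 1 else 0),
       c + (if cspClassify dst strict tol p == "mtime_copy" then 1 else 0),
       d + (if cspClassify dst strict tol p == "size_diff" then 1 else 0),
       e + (if cspClassify dst strict tol p == "missing" then 1 else 0)) := by
  cases hget : (PySem.Dict.mk dst).get? p.1 with
  | none =>
    simp [cspStepA, cspClassify, cspFalsy, cspCopyLab, hget]
  | some dm =>
    cases hemp : dm.isEmpty with
    | true => simp [cspStepA, cspClassify, cspFalsy, cspCopyLab, hget, hemp]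
    | false =>
      have hdm : cspDm dst p.1 = dm := by simp [cspDm, hget]
      by_cases hsz : (PySem.Dict.mk p.2).getD "size" 0 = (PySem.Dict.mk dm).getD "size" 0
      · cases strict with
        | false =>
          simp [cspStepA, cspClassify, cspFalsy, cspSizeNe, cspCopyLab, hget, hemp, hdm, hsz]
        | true =>
          cases hcl : mtime_close ((PySem.Dict.mk p.2).getD "mtime" 0) ((PySem.Dict.mk dm).getD "mtime" 0) tol with
          | false =>
            simp [cspStepA, cspClassify, cspFalsy, cspSizeNe, cspFar, cspCopyLab, hget, hemp, hdm, hsz, hcl]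
          | true =>
            simp [cspStepA, cspClassify, cspFalsy, cspSizeNe, cspFar, cspCopyLab, hget, hemp, hdm, hsz, hcl]
      · simp [cspStepA, cspClassify, cspFalsy, cspSizeNe, cspCopyLab, hget, hemp, hdm, hsz]

-- A's fold, from any start state, appends the copy-classified rels and adds the label counts.
lemma cspFold_eq (dst : List (String × List (String × Int))) (strict : Bool) (tol : Int)
    (src : List (String × List (String × Int))) (tc : List String) (a b c d e : Int) :
    src.foldl (cspStepA dst strict tol) (tc, a, b, c, d, e) =
      (tc ++ (src.filter (fun p => cspCopyLab (cspClassify dst strict tol p))).map Prod.fst,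
       a + (src.countP (fun p => cspClassify dst strict tol p == "skip_size") : Int),
       b + (src.countP (fun p => cspClassify dst strict tol p == "mtime_skip") : Int),
       c + (src.countP (fun p => cspClassify dst strict tol p == "mtime_copy") : Int),
       d + (src.countP (fun p => cspClassify dst strict tol p == "size_diff") : Int),
       e + (src.countP (fun p => cspClassify dst strict tol p == "missing") : Int)) := by
  induction src generalizing tc a b c d e with
  | nil => simp
  | cons hd tl ih =>
    rw [List.foldl_cons, cspStepA_eq, ih]
    simp only [List.filter_cons, List.countP_cons, Prod.mk.injEq]
    refine ⟨?_, ?_, ?_, ?_, ?_, ?_⟩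
    · by_cases h : cspCopyLab (cspClassify dst strict tol hd) = true <;> simp [h]
    all_goals split_ifs <;> push_cast <;> ring

lemma key_inj {β : Type} {l : List (String × β)} (h : (l.map Prod.fst).Nodup) :
    ∀ p ∈ l, ∀ q ∈ l, p.1 = q.1 → p = q := by
  induction l with
  | nil => intro p hp; simp at hp
  | cons hd tl ih =>
    simp only [List.map_cons, List.nodup_cons] at h
    intro p hp q hq hk
    rcases List.mem_cons.1 hp with hp1 | hp1
    · rcases List.mem_cons.1 hq with hq1 | hq1
      · rw [hp1, hq1]
      · exfalso
        apply h.1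
        have hqe : q.1 = hd.1 := by rw [← hk, hp1]
        exact hqe ▸ List.mem_map.2 ⟨q, hq1, rfl⟩
    · rcases List.mem_cons.1 hq with hq1 | hq1
      · exfalso
        apply h.1
        have hpe : p.1 = hd.1 := by rw [hk, hq1]
        exact hpe ▸ List.mem_map.2 ⟨p, hp1, rfl⟩
      · exact ih h.2 p hp1 q hq1 hk

lemma mem_map_fst_filter {β : Type} {items : List (String × β)}
    (hnd : (items.map Prod.fst).Nodup) (P : String × β → Bool)
    {p : String × β} (hp : p ∈ items) :
    p.1 ∈ (items.filter P).map Prod.fst ↔ P p = true := by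
  constructor
  · intro hm
    rcases List.mem_map.1 hm with ⟨q, hq, hkey⟩
    rcases List.mem_filter.1 hq with ⟨hqi, hPq⟩
    rwa [key_inj hnd p hp q hqi hkey.symm]
  · intro hP
    exact List.mem_map.2 ⟨p, List.mem_filter.2 ⟨hp, hP⟩, rfl⟩

-- membership in B's copy set equals the copy classification, given nodup source keys
lemma contains_copy_false (dst : List (String × List (String × Int))) (tol : Int)
    (items : List (String × List (String × Int))) (hnd : (items.map Prod.fst).Nodup)
    {p : String × List (String × Int)} (hp : p ∈ items) :
    PySem.Set.contains
      (PySem.Set.union (PySem.Set.union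
        (PySem.Set.ofList ((items.filter (fun q => cspFalsy dst q)).map Prod.fst))
        (((items.filter (fun q => !cspFalsy dst q)).filter (fun q => cspSizeNe dst q)).map Prod.fst))
        ([] : List String))
      p.1 = cspCopyLab (cspClassify dst false tol p) := by
  have hmem := fun P => mem_map_fst_filter hnd P hp
  rw [Bool.eq_iff_iff, PySem.Set.contains_iff, PySem.Set.mem_union, PySem.Set.mem_union,
      PySem.Set.mem_ofList]
  simp only [List.filter_filter, List.not_mem_nil, or_false, hmem]
  unfold cspClassify cspCopyLab
  by_cases h1 : cspFalsy dst p <;> by_cases h2 : cspSizeNe dst p <;> simp [h1, h2]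

lemma contains_copy_true (dst : List (String × List (String × Int))) (tol : Int)
    (items : List (String × List (String × Int))) (hnd : (items.map Prod.fst).Nodup)
    {p : String × List (String × Int)} (hp : p ∈ items) :
    PySem.Set.contains
      (PySem.Set.union (PySem.Set.union
        (PySem.Set.ofList ((items.filter (fun q => cspFalsy dst q)).map Prod.fst))
        (((items.filter (fun q => !cspFalsy dst q)).filter (fun q => cspSizeNe dst q)).map Prod.fst))
        ((((items.filter (fun q => !cspFalsy dst q)).filter (fun q => !cspSizeNe dst q)).filter
            (fun q => cspFar dst tol q)).map Prod.fst))
      p.1 = cspCopyLab (cspClassify dst true tol p) := by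
  have hmem := fun P => mem_map_fst_filter hnd P hp
  rw [Bool.eq_iff_iff, PySem.Set.contains_iff, PySem.Set.mem_union, PySem.Set.mem_union,
      PySem.Set.mem_ofList]
  simp only [List.filter_filter, hmem]
  unfold cspClassify cspCopyLab
  by_cases h1 : cspFalsy dst p <;> by_cases h2 : cspSizeNe dst p <;>
    by_cases h3 : cspFar dst tol p <;> simp [h1, h2, h3]

-- each staged filter equals filtering by the classification label
lemma filter_missing (dst : List (String × List (String × Int))) (strict : Bool) (tol : Int)
    (items : List (String × List (String × Int))) :
    items.filter (fun p => cspFalsy dst p) =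
      items.filter (fun p => cspClassify dst strict tol p == "missing") := by
  refine List.filter_congr (fun p _ => ?_)
  unfold cspClassify
  by_cases h1 : cspFalsy dst p <;> by_cases h2 : cspSizeNe dst p <;> cases strict <;>
    by_cases h3 : cspFar dst tol p <;> simp [h1, h2, h3]

lemma filter_sizediff (dst : List (String × List (String × Int))) (strict : Bool) (tol : Int)
    (items : List (String × List (String × Int))) :
    (items.filter (fun p => !cspFalsy dst p)).filter (fun p => cspSizeNe dst p) =
      items.filter (fun p => cspClassify dst strict tol p == "size_diff") := by
  rw [List.filter_filter]
  refine List.filter_congr (fun p _ => ?_)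
  unfold cspClassify
  by_cases h1 : cspFalsy dst p <;> by_cases h2 : cspSizeNe dst p <;> cases strict <;>
    by_cases h3 : cspFar dst tol p <;> simp [h1, h2, h3]

lemma filter_skipsize (dst : List (String × List (String × Int))) (tol : Int)
    (items : List (String × List (String × Int))) :
    (items.filter (fun p => !cspFalsy dst p)).filter (fun p => !cspSizeNe dst p) =
      items.filter (fun p => cspClassify dst false tol p == "skip_size") := by
  rw [List.filter_filter]
  refine List.filter_congr (fun p _ => ?_)
  unfold cspClassify
  by_cases h1 : cspFalsy dst p <;> by_cases h2 : cspSizeNe dst p <;> simp [h1, h2]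

lemma filter_mtcopy (dst : List (String × List (String × Int))) (tol : Int)
    (items : List (String × List (String × Int))) :
    ((items.filter (fun p => !cspFalsy dst p)).filter (fun p => !cspSizeNe dst p)).filter
        (fun p => cspFar dst tol p) =
      items.filter (fun p => cspClassify dst true tol p == "mtime_copy") := by
  rw [List.filter_filter, List.filter_filter]
  refine List.filter_congr (fun p _ => ?_)
  unfold cspClassify
  by_cases h1 : cspFalsy dst p <;> by_cases h2 : cspSizeNe dst p <;>
    by_cases h3 : cspFar dst tol p <;> simp [h1, h2, h3]

lemma filter_mtskip (dst : List (String × List (String × Int))) (tol : Int)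
    (items : List (String × List (String × Int))) :
    ((items.filter (fun p => !cspFalsy dst p)).filter (fun p => !cspSizeNe dst p)).filter
        (fun p => !cspFar dst tol p) =
      items.filter (fun p => cspClassify dst true tol p == "mtime_skip") := by
  rw [List.filter_filter, List.filter_filter]
  refine List.filter_congr (fun p _ => ?_)
  unfold cspClassify
  by_cases h1 : cspFalsy dst p <;> by_cases h2 : cspSizeNe dst p <;>
    by_cases h3 : cspFar dst tol p <;> simp [h1, h2, h3]

lemma pvNodupKeys_nodup {β : Type} {l : List (String × β)} (h : pvNodupKeys l = true) :
    (l.map Prod.fst).Nodup := by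
  induction l with
  | nil => simp
  | cons hd tl ih =>
    simp only [pvNodupKeys, Bool.and_eq_true, Bool.not_eq_true'] at h
    refine List.nodup_cons.2 ⟨?_, ih h.2⟩
    intro hm
    rw [← List.contains_iff_mem] at hm
    rw [h.1] at hm
    exact Bool.false_ne_true hm

lemma countP_label_zero (dst : List (String × List (String × Int))) (strict : Bool) (tol : Int)
    (items : List (String × List (String × Int))) (L : String)
    (h : ∀ p, (cspClassify dst strict tol p == L) = false) :
    items.countP (fun p => cspClassify dst strict tol p == L) = 0 := by
  rw [List.countP_eq_zero]
  intro p _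
  simp [h p]

-- ===== VERDICT (by name: the statement is the Claim_ definition above) =====
theorem compute_sync_plan_spec : Claim_equal_compute_sync_plan := by
  intro src dst strict tol _ hpre
  have hnd : (src.map Prod.fst).Nodup := by
    unfold Pre_compute_sync_plan at hpre
    simp only [Bool.and_eq_true] at hpre
    exact pvNodupKeys_nodup hpre.1.1.1
  unfold Spec_compute_sync_plan compute_sync_plan compute_sync_plan_alt
  rw [cspFold_eq]
  cases strict with
  | false =>
    have hz1 := countP_label_zero dst false tol src "mtime_copy" (fun p => by
      unfold cspClassify; by_cases h1 : cspFalsy dst p <;> by_cases h2 : cspSizeNe dst p <;> simp [h1, h2])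
    have hz2 := countP_label_zero dst false tol src "mtime_skip" (fun p => by
      unfold cspClassify; by_cases h1 : cspFalsy dst p <;> by_cases h2 : cspSizeNe dst p <;> simp [h1, h2])
    have hcopy := List.filter_congr (fun p hp => contains_copy_false dst tol src hnd hp)
    simp only [Bool.false_eq_true, if_false, List.map_nil, PySem.List.len_eq,
      List.nil_append, zero_add, List.length_nil, Nat.cast_zero]
    rw [hcopy]
    simp only [filter_missing dst false tol src, filter_sizediff dst false tol src,
      filter_skipsize dst tol src, ← List.countP_eq_length_filter, hz1, hz2, Nat.cast_zero]
  | true =>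
    have hz := countP_label_zero dst true tol src "skip_size" (fun p => by
      unfold cspClassify; by_cases h1 : cspFalsy dst p <;> by_cases h2 : cspSizeNe dst p <;>
        by_cases h3 : cspFar dst tol p <;> simp [h1, h2, h3])
    have hcopy := List.filter_congr (fun p hp => contains_copy_true dst tol src hnd hp)
    simp only [if_true, PySem.List.len_eq, List.nil_append, zero_add,
      List.length_nil, Nat.cast_zero]
    rw [hcopy]
    simp only [filter_missing dst true tol src, filter_sizediff dst true tol src,
      filter_mtcopy dst tol src, filter_mtskip dst tol src,
      ← List.countP_eq_length_filter, hz, Nat.cast_zero]
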